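-- pv_equiv track=rewrite | github.com/vtarsh/code-rag-mcp | scripts/prepare_finetune_data.py | _dedupe_by_file
-- ===== SOURCE A (Python) =====
-- def _dedupe_by_file(pairs: list[dict]) -> list[dict]:
--     """Keep one positive per (repo, file_path) per ticket.
--
--     Preference order:
--       1. diff-positive (hunk — more specific) over chunk-positive.
--       2. longest document content among candidates.
--
--     This combats label inflation: in v4, a file with 5 chunks + 1 diff gave
--     6 copies of essentially the same (query, document)-ish pair, inflating
--     loss weight on that one file.
--     """
--     best: dict[tuple[str, str], dict] = {}
--     for p in pairs:
--         key = (p.get("repo_name") or "", p.get("file_path") or "")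
--         if not key[0]:
--             continue
--         cur = best.get(key)
--         if cur is None:
--             best[key] = p
--             continue
--         # Prefer diff over chunk
--         if p.get("positive_source") == "diff" and cur.get("positive_source") != "diff":
--             best[key] = p
--             continue
--         if p.get("positive_source") != "diff" and cur.get("positive_source") == "diff":
--             continue
--         # Same source — prefer longer document
--         if len(p.get("document") or "") > len(cur.get("document") or ""):
--             best[key] = p
--     return list(best.values())
-- ===== SOURCE B (Python) =====
-- def _dedupe_by_file(pairs: list[dict]) -> list[dict]:
--     """Group candidates per (repo, file_path), then pick each group's winner with max().
--
--     max's key (is_diff, doc_len) encodes the preference order: diff-positive first,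
--     then longest document; max returns the FIRST maximal candidate, so earlier pairs
--     win ties, exactly as intended.
--     """
--     groups: dict[tuple[str, str], list[dict]] = {}
--     for p in pairs:
--         repo = p.get("repo_name") or ""
--         if not repo:
--             continue
--         key = (repo, p.get("file_path") or "")
--         groups.setdefault(key, []).append(p)
--     return [
--         max(g, key=lambda q: (q.get("positive_source") == "diff", len(q.get("document") or "")))
--         for g in groups.values()
--     ]
-- ===== Notes on version B (the rewrite author's own statement) =====
-- stated objective: alternative
-- what changed: Replaces the online best-so-far dict with conditional replacement branches by a two-phase group-then-reduce: one pass groups candidates per (repo, file_path), then each group's winner is picked with max() over the tuple key (is_diff, doc_len), relying on max returning the first maximal element to keep earlier pairs on ties.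
import Mathlib
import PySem

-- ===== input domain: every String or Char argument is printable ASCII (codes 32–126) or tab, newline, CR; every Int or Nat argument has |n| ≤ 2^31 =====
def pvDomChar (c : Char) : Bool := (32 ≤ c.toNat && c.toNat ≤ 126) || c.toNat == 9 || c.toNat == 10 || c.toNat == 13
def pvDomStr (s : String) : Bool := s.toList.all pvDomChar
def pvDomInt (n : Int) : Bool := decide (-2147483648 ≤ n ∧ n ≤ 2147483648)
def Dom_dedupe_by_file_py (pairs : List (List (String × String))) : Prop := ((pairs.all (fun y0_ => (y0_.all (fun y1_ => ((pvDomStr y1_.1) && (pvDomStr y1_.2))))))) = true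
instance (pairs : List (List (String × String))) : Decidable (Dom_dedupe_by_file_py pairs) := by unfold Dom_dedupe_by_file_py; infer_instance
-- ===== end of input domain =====

-- B keeps the same per-(repo,file) winner but by a two-phase group-then-reduce instead of A's
-- online best-so-far dict with replacement branches (objective: alternative, same cost).

-- ===== PORT A =====
-- p.get(k) or ""  (missing key -> None -> ""; an empty value is falsy and also yields "")
def pvAGet (p : List (String × String)) (k : String) : String :=
  ((PySem.Dict.mk p).get? k).getD ""

-- p.get("positive_source") == "diff"
def pvAIsDiff (p : List (String × String)) : Bool :=
  (PySem.Dict.mk p).get? "positive_source" == some "diff"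

-- len(p.get("document") or "")
def pvADocLen (p : List (String × String)) : Int :=
  PySem.Str.len (pvAGet p "document")

def pvAStep (best : PySem.Dict (String × String) (List (String × String)))
    (p : List (String × String)) : PySem.Dict (String × String) (List (String × String)) :=
  let key := (pvAGet p "repo_name", pvAGet p "file_path")
  if key.1 = "" then best
  else
    match best.get? key with
    | none => best.insert key p
    | some cur =>
      if pvAIsDiff p && !pvAIsDiff cur then best.insert key p
      else if !pvAIsDiff p && pvAIsDiff cur then best
      else if pvADocLen p > pvADocLen cur then best.insert key p
      else best

def dedupe_by_file_py (pairs : List (List (String × String))) : List (List (String × String)) :=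
  (pairs.foldl pvAStep PySem.Dict.empty).values

-- ===== PORT B =====
-- p.get("repo_name") or ""
def pvBRepo (p : List (String × String)) : String :=
  ((PySem.Dict.mk p).get? "repo_name").getD ""

-- the max() key: (q.get("positive_source") == "diff", len(q.get("document") or ""))
def pvBKey (q : List (String × String)) : Bool × Int :=
  ((PySem.Dict.mk q).get? "positive_source" == some "diff",
   PySem.Str.len (((PySem.Dict.mk q).get? "document").getD ""))

-- Python's '>' on (bool, int) tuples: lexicographic, False < True (ported by hand; exact)
def pvBKeyGt (a b : Bool × Int) : Bool := (a.1 && !b.1) || (a.1 == b.1 && a.2 > b.2)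

-- max(g, key=pvBKey): first maximal element; [] is unreachable (groups are nonempty)
def pvBMax (g : List (List (String × String))) : List (String × String) :=
  match g with
  | [] => []
  | x :: xs => xs.foldl (fun cur q => if pvBKeyGt (pvBKey q) (pvBKey cur) then q else cur) x

-- groups.setdefault(key, []).append(p)
def pvBStep (groups : PySem.Dict (String × String) (List (List (String × String))))
    (p : List (String × String)) : PySem.Dict (String × String) (List (List (String × String))) :=
  let repo := pvBRepo p
  if repo = "" then groups
  else
    let key := (repo, ((PySem.Dict.mk p).get? "file_path").getD "")
    groups.insert key (groups.getD key [] ++ [p])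

def dedupe_by_file_py_alt (pairs : List (List (String × String))) : List (List (String × String)) :=
  ((pairs.foldl pvBStep PySem.Dict.empty).values).map pvBMax

-- ===== PRECONDITION & SPEC =====
def Spec_dedupe_by_file_py (pairs : List (List (String × String))) (out : List (List (String × String))) : Prop := out = dedupe_by_file_py_alt pairs
instance (pairs : List (List (String × String))) (out : List (List (String × String))) : Decidable (Spec_dedupe_by_file_py pairs out) := by unfold Spec_dedupe_by_file_py; infer_instance

-- ===== CLAIM (what is proved, stated in full; the proofs are below) =====
def Claim_equal_dedupe_by_file_py : Prop := ∀ (pairs : List (List (String × String))), Dom_dedupe_by_file_py pairs → Spec_dedupe_by_file_py pairs (dedupe_by_file_py pairs)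

-- ===== LEMMAS AND PROOFS =====

-- A's best-dict is the image of B's groups-dict under pvBMax, value-wise.
def pvMapVals (d : PySem.Dict (String × String) (List (List (String × String)))) :
    PySem.Dict (String × String) (List (String × String)) :=
  PySem.Dict.mk (d.items.map (fun kv => (kv.1, pvBMax kv.2)))

theorem pvMapVals_get? (d : PySem.Dict (String × String) (List (List (String × String))))
    (k : String × String) : (pvMapVals d).get? k = (d.get? k).map pvBMax := by
  simp [pvMapVals, PySem.Dict.get?, List.find?_map, Function.comp_def, Option.map_map]

theorem pvMapVals_keys (d : PySem.Dict (String × String) (List (List (String × String)))) :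
    (pvMapVals d).keys = d.keys := by
  simp [pvMapVals, PySem.Dict.keys]

theorem pvMapVals_contains (d : PySem.Dict (String × String) (List (List (String × String))))
    (k : String × String) : (pvMapVals d).contains k = d.contains k := by
  rw [PySem.Dict.contains_eq_isSome_get?, PySem.Dict.contains_eq_isSome_get?, pvMapVals_get?]
  cases d.get? k <;> rfl

theorem pvMapVals_insert (d : PySem.Dict (String × String) (List (List (String × String))))
    (k : String × String) (v : List (List (String × String))) :
    pvMapVals (d.insert k v) = (pvMapVals d).insert k (pvBMax v) := by
  apply PySem.Dict.ext
  by_cases h : d.contains k = true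
  · rw [show (pvMapVals (d.insert k v)).items = (d.insert k v).items.map (fun kv => (kv.1, pvBMax kv.2)) from rfl,
      PySem.Dict.items_insert_of_contains _ _ h,
      PySem.Dict.items_insert_of_contains _ _ (by rw [pvMapVals_contains]; exact h)]
    rw [show (pvMapVals d).items = d.items.map (fun kv => (kv.1, pvBMax kv.2)) from rfl]
    simp only [List.map_map]
    refine List.map_congr_left (fun q hq => ?_)
    by_cases hk : (q.1 == k) = true <;> simp [Function.comp, hk]
  · rw [show (pvMapVals (d.insert k v)).items = (d.insert k v).items.map (fun kv => (kv.1, pvBMax kv.2)) from rfl,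
      PySem.Dict.items_insert_of_not_contains _ _ (by simpa using h),
      PySem.Dict.items_insert_of_not_contains _ _ (by rw [pvMapVals_contains]; simpa using h)]
    simp [pvMapVals]

theorem pv_insert_same {κ ν : Type} [BEq κ] [LawfulBEq κ]
    (d : PySem.Dict κ ν) (k : κ) (v : ν) (h : d.get? k = some v) (hn : d.keys.Nodup) :
    d.insert k v = d := by
  apply PySem.Dict.ext
  rw [PySem.Dict.items_insert_of_contains _ _ (by rw [PySem.Dict.contains_eq_isSome_get?, h]; rfl)]
  have hmap : ∀ q ∈ d.items, (if (q.1 == k) = true then (k, v) else q) = q := by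
    intro q hq
    obtain ⟨q1, q2⟩ := q
    by_cases hk : (q1 == k) = true
    · have hk' : q1 = k := by simpa using hk
      have h2 := PySem.Dict.get?_of_mem_items d (k := q1) (v := q2) hq hn
      rw [hk'] at h2
      have hv : v = q2 := by have := h.symm.trans h2; simpa using this
      simp [hk', hv]
    · simp [hk]
  rw [List.map_congr_left hmap]
  simp

theorem pvBMax_append (g : List (List (String × String))) (p : List (String × String)) (h : g ≠ []) :
    pvBMax (g ++ [p]) = if pvBKeyGt (pvBKey p) (pvBKey (pvBMax g)) then p else pvBMax g := by
  cases g with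
  | nil => exact absurd rfl h
  | cons x xs => simp [pvBMax, List.foldl_append]

theorem pv_step_comm (g : PySem.Dict (String × String) (List (List (String × String))))
    (p : List (String × String)) (hn : g.keys.Nodup)
    (hne : ∀ kv ∈ g.items, kv.2 ≠ []) :
    pvAStep (pvMapVals g) p = pvMapVals (pvBStep g p) := by
  unfold pvAStep pvBStep
  simp only [pvAGet, pvBRepo]
  by_cases hr : (((PySem.Dict.mk p).get? "repo_name").getD "") = ""
  · simp [hr]
  · simp only [hr, if_neg, not_false_iff]
    rw [pvMapVals_get?]
    cases hg : g.get? (((PySem.Dict.mk p).get? "repo_name").getD "", ((PySem.Dict.mk p).get? "file_path").getD "") with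
    | none =>
      rw [PySem.Dict.getD_eq_get?_getD, hg]
      simp [pvMapVals_insert, pvBMax]
    | some g0 =>
      have hg0 : g0 ≠ [] := hne _ (PySem.Dict.mem_items_of_get?_eq_some g hg)
      rw [PySem.Dict.getD_eq_get?_getD, hg]
      simp only [Option.map_some, Option.getD_some]
      rw [pvMapVals_insert, pvBMax_append _ _ hg0]
      have hsame := pv_insert_same (pvMapVals g)
        (((PySem.Dict.mk p).get? "repo_name").getD "", ((PySem.Dict.mk p).get? "file_path").getD "")
        (pvBMax g0) (by rw [pvMapVals_get?, hg]; rfl) (by rw [pvMapVals_keys]; exact hn)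
      have hdp : pvAIsDiff p = (pvBKey p).1 := rfl
      have hdc : pvAIsDiff (pvBMax g0) = (pvBKey (pvBMax g0)).1 := rfl
      have hlp : pvADocLen p = (pvBKey p).2 := rfl
      have hlc : pvADocLen (pvBMax g0) = (pvBKey (pvBMax g0)).2 := rfl
      rw [hdp, hdc, hlp, hlc]
      unfold pvBKeyGt
      cases hb1 : (pvBKey p).1 <;> cases hb2 : (pvBKey (pvBMax g0)).1 <;>
        by_cases hl : (pvBKey p).2 > (pvBKey (pvBMax g0)).2 <;>
        simp [hl, hsame]

theorem pv_inv (pairs : List (List (String × String)))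
    (g : PySem.Dict (String × String) (List (List (String × String))))
    (hn : g.keys.Nodup) (hne : ∀ kv ∈ g.items, kv.2 ≠ []) :
    pairs.foldl pvAStep (pvMapVals g) = pvMapVals (pairs.foldl pvBStep g) := by
  induction pairs generalizing g with
  | nil => rfl
  | cons p rest ih =>
    simp only [List.foldl_cons]
    rw [pv_step_comm g p hn hne]
    refine ih (pvBStep g p) ?_ ?_
    · unfold pvBStep
      by_cases hr : pvBRepo p = ""
      · simpa [hr] using hn
      · simp only [hr, if_neg, not_false_iff]
        exact PySem.Dict.nodup_keys_insert _ _ _ hn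
    · unfold pvBStep
      intro kv hkv
      by_cases hr : pvBRepo p = ""
      · exact hne kv (by simpa [hr] using hkv)
      · simp only [hr, if_neg, not_false_iff] at hkv
        rcases (PySem.Dict.mem_items_insert _ _ _ _).mp hkv with h1 | h2
        · subst h1; simp
        · exact hne kv h2.1

-- ===== VERDICT (by name: the statement is the Claim_ definition above) =====
theorem dedupe_by_file_py_spec : Claim_equal_dedupe_by_file_py := by
  intro pairs _
  unfold Spec_dedupe_by_file_py dedupe_by_file_py dedupe_by_file_py_alt
  have h0 : (PySem.Dict.empty : PySem.Dict (String × String) (List (String × String))) =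
      pvMapVals PySem.Dict.empty := rfl
  rw [h0, pv_inv pairs PySem.Dict.empty (by simp [PySem.Dict.empty]) (by simp [PySem.Dict.empty])]
  simp [pvMapVals, PySem.Dict.values]
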